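-- pv_equiv track=rewrite | github.com/Rew93/codevars_task | code_vars_task/the_observed_pin.py | comb_for_6key
-- ===== SOURCE A (Python) =====
-- def comb_for_6key(num):
--     lst = []
--     for a in num[0]:
--         for b in num[1]:
--             for c in num[2]:
--                 for d in num[3]:
--                     for i in num[4]:
--                         for f in num[5]:
--                             lst.append(a + b + c + d + i + f)
--     return sorted(lst)
-- ===== SOURCE B (Python) =====
-- def comb_for_6key(num):
--     # An empty key position means there are no combinations at all.
--     if '' in num[:6]:
--         return []
--     # Build the result back-to-front, one key position at a time: count each
--     # position's characters, then emit blocks in increasing character order,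
--     # so the output comes out already sorted and no final sort is needed.
--     out = ['']
--     for i in range(5, -1, -1):
--         counts = {}
--         for ch in num[i]:
--             counts[ch] = counts.get(ch, 0) + 1
--         out = [c + r for c in sorted(counts) for r in out for _ in range(counts[c])]
--     return out
-- ===== Notes on version B (the rewrite author's own statement) =====
-- stated objective: alternative
-- what changed: B never sorts the product: it counts each position's characters and assembles the result back-to-front, emitting blocks in increasing character order so the list is produced already sorted, instead of A's enumerate-then-sort.
import Mathlib
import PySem

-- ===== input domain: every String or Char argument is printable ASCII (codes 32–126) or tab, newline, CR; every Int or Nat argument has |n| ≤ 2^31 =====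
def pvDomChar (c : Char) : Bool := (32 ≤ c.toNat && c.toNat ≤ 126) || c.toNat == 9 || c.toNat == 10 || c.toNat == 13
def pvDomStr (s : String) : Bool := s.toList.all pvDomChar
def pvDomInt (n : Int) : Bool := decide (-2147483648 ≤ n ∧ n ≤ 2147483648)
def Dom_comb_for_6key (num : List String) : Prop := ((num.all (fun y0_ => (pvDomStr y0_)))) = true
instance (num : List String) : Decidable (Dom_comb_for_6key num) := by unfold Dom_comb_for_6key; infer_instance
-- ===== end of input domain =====

-- B builds the sorted key list directly (character counts per position, blocks emitted back-to-front in
-- increasing character order) instead of enumerating the raw product and sorting it afterwards; objective: alternative.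

-- ===== PORT A =====
def comb_for_6key (num : List String) : List String :=
  let lst : List String :=
    (PySem.List.pyGetD num 0 "").toList.foldl (fun acc a =>
      (PySem.List.pyGetD num 1 "").toList.foldl (fun acc b =>
        (PySem.List.pyGetD num 2 "").toList.foldl (fun acc c =>
          (PySem.List.pyGetD num 3 "").toList.foldl (fun acc d =>
            (PySem.List.pyGetD num 4 "").toList.foldl (fun acc i =>
              (PySem.List.pyGetD num 5 "").toList.foldl (fun acc f =>
                acc ++ [String.ofList [a, b, c, d, i, f]]) acc) acc) acc) acc) acc) []
  PySem.List.sorted lst (fun x => x) false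

-- ===== PORT B =====
def comb_for_6key_alt (num : List String) : List String :=
  if "" ∈ PySem.List.slice num none (some 6) then [] else
  (PySem.List.pyRange 5 (-1) (-1)).foldl (fun out i =>
    let counts : PySem.Dict Char Int :=
      (PySem.List.pyGetD num i "").toList.foldl
        (fun d ch => d.insert ch (d.getD ch 0 + 1)) PySem.Dict.empty
    (PySem.List.sorted counts.keys (fun x => x) false).flatMap (fun c =>
      out.flatMap (fun r =>
        (PySem.List.pyRange 0 (counts.getD c 0) 1).map
          (fun _ => String.ofList (c :: r.toList))))) [""]

-- ===== PRECONDITION & SPEC =====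
-- A raises IndexError when the list runs out before position 5 is reached and no earlier position is
-- the empty string (an empty position ends the loops and A returns []).
def Pre_comb_for_6key (num : List String) : Prop := 6 ≤ num.length ∨ "" ∈ num.take 6
instance (num : List String) : Decidable (Pre_comb_for_6key num) := by unfold Pre_comb_for_6key; infer_instance
def pvWitness_comb_for_6key : List String := ["27", "1", "3", "5", "8", "90"]

def Spec_comb_for_6key (num : List String) (out : List String) : Prop := out = comb_for_6key_alt num
instance (num : List String) (out : List String) : Decidable (Spec_comb_for_6key num out) := by unfold Spec_comb_for_6key; infer_instance

-- ===== CLAIM (what is proved, stated in full; the proofs are below) =====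
def Claim_equal_comb_for_6key : Prop := ∀ (num : List String), Dom_comb_for_6key num → Pre_comb_for_6key num → Spec_comb_for_6key num (comb_for_6key num)

-- ===== LEMMAS AND PROOFS =====

-- prefix one character onto a string
def pvPrep (c : Char) (r : String) : String := String.ofList (c :: r.toList)

-- the (unsorted) product of the key positions, as A enumerates it, over raw character lists
def pvProdC : List (List Char) → List (List Char)
  | [] => [[]]
  | s :: rest => s.flatMap (fun c => (pvProdC rest).map (c :: ·))

-- one level of B: blocks in increasing character order, multiplicities via replicate
def pvStep (s : List Char) (out : List String) : List String :=
  (PySem.List.sorted (PySem.Set.ofList s) (fun x => x) false).flatMap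
    (fun c => out.flatMap (fun r => List.replicate (s.count c) (pvPrep c r)))

def pvChain : List (List Char) → List String
  | [] => [""]
  | s :: rest => pvStep s (pvChain rest)

theorem pv_count_flatMap {α β : Type} [DecidableEq β] (l : List α) (f : α → List β) (x : β) :
    ((l.flatMap f).count x) = (l.map (fun a => (f a).count x)).sum := by
  induction l with
  | nil => simp
  | cons a t ih => simp [List.count_append, ih]

theorem pv_sum_map_flatMap {α β : Type} (l : List α) (f : α → List β) (ψ : β → Nat) :
    (((l.flatMap f).map ψ).sum) = (l.map (fun a => ((f a).map ψ).sum)).sum := by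
  induction l with
  | nil => simp
  | cons a t ih => simp [ih]

theorem pv_sum_indicator {α : Type} [DecidableEq α] (D : List α) (x : α) (f : α → Nat)
    (hD : D.Nodup) : (D.map (fun c => if c = x then f c else 0)).sum = if x ∈ D then f x else 0 := by
  induction D with
  | nil => simp
  | cons a t ih =>
    rcases List.nodup_cons.mp hD with ⟨ha, ht⟩
    by_cases hax : a = x
    · subst hax
      simp [ih ht, ha]
    · have hxa : ¬ (x = a) := fun h => hax h.symm
      simp [if_neg hax, ih ht, hxa]

-- a list is, up to permutation, its distinct elements each repeated with its multiplicity
theorem pv_expand_perm (s : List Char) :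
    s.Perm ((PySem.Set.ofList s).flatMap (fun c => List.replicate (s.count c) c)) := by
  apply List.perm_iff_count.mpr
  intro x
  rw [pv_count_flatMap]
  have : ((PySem.Set.ofList s).map (fun c => (List.replicate (s.count c) c).count x)).sum
      = ((PySem.Set.ofList s).map (fun c => if c = x then s.count c else 0)).sum := by
    congr 1
    apply List.map_congr_left
    intro c _
    rw [List.count_replicate]
    by_cases h : c = x
    · subst h; simp
    · simp [h]
  rw [this, pv_sum_indicator _ _ _ (PySem.Set.nodup_ofList s)]
  by_cases hx : x ∈ s
  · simp [PySem.Set.mem_ofList, hx]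
  · simp [PySem.Set.mem_ofList, hx, List.count_eq_zero_of_not_mem hx]

theorem pv_count_flatMap_replicate {α β : Type} [DecidableEq β] (out : List α) (k : Nat) (g : α → β) (x : β) :
    ((out.flatMap (fun r => List.replicate k (g r))).count x) = k * (out.map g).count x := by
  induction out with
  | nil => simp
  | cons r t ih =>
    simp only [List.flatMap_cons, List.count_append, List.count_replicate, ih, List.map_cons,
      List.count_cons]
    by_cases h : g r = x
    · simp [h, Nat.mul_succ, Nat.add_comm]
    · simp [h]

-- a multiset sum over a list equals the multiplicity-weighted sum over its distinct elements
theorem pv_sum_over_distinct (s : List Char) (ψ : Char → Nat) :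
    (s.map ψ).sum = ((PySem.Set.ofList s).map (fun c => s.count c * ψ c)).sum := by
  have h1 : (s.map ψ).sum
      = (((PySem.Set.ofList s).flatMap (fun c => List.replicate (s.count c) c)).map ψ).sum := by
    exact List.Perm.sum_eq (List.Perm.map ψ (pv_expand_perm s))
  rw [h1, pv_sum_map_flatMap]
  congr 1
  apply List.map_congr_left
  intro c _
  simp [List.map_replicate, List.sum_replicate]

theorem pv_prep_lt {c c' : Char} (h : c < c') (r r' : String) : pvPrep c r < pvPrep c' r' := by
  rw [String.lt_iff_toList_lt]
  simp only [pvPrep, String.toList_ofList]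
  exact List.Lex.rel h

theorem pv_prep_le {c : Char} {r r' : String} (h : r ≤ r') : pvPrep c r ≤ pvPrep c r' := by
  rw [String.le_iff_toList_le]
  simp only [pvPrep, String.toList_ofList]
  exact List.cons_le_cons c (String.le_iff_toList_le.mp h)

theorem pvStep_perm (s : List Char) (out rest : List String) (hperm : out.Perm rest) :
    (pvStep s out).Perm (s.flatMap (fun c => rest.map (pvPrep c))) := by
  apply List.perm_iff_count.mpr
  intro x
  rw [pvStep, pv_count_flatMap, pv_count_flatMap]
  have hC : (PySem.List.sorted (PySem.Set.ofList s) (fun x => x) false).Perm (PySem.Set.ofList s) :=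
    PySem.List.sorted_perm _ _ _
  have h1 : ((PySem.List.sorted (PySem.Set.ofList s) (fun x => x) false).map
        (fun c => (out.flatMap (fun r => List.replicate (s.count c) (pvPrep c r))).count x)).sum
      = ((PySem.Set.ofList s).map
        (fun c => (out.flatMap (fun r => List.replicate (s.count c) (pvPrep c r))).count x)).sum :=
    List.Perm.sum_eq (List.Perm.map _ hC)
  rw [h1]
  have h2 : ((PySem.Set.ofList s).map
        (fun c => (out.flatMap (fun r => List.replicate (s.count c) (pvPrep c r))).count x)).sum
      = ((PySem.Set.ofList s).map (fun c => s.count c * ((rest.map (pvPrep c)).count x))).sum := by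
    congr 1
    apply List.map_congr_left
    intro c _
    rw [pv_count_flatMap_replicate]
    congr 1
    exact List.Perm.count_eq (List.Perm.map _ hperm) x
  rw [h2, ← pv_sum_over_distinct]

theorem pvStep_pairwise (s : List Char) (out : List String) (hpw : out.Pairwise (· ≤ ·)) :
    (pvStep s out).Pairwise (· ≤ ·) := by
  rw [pvStep]
  apply List.pairwise_flatMap.mpr
  constructor
  · intro c _
    apply List.pairwise_flatMap.mpr
    refine ⟨fun r _ => ?_, ?_⟩
    · exact List.pairwise_replicate.mpr (Or.inr (le_refl _))
    · refine hpw.imp ?_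
      intro r r' hle x hx y hy
      rw [List.eq_of_mem_replicate hx, List.eq_of_mem_replicate hy]
      exact pv_prep_le hle
  · refine (PySem.List.sorted_ofList_pairwise_lt s).imp ?_
    intro c c' hlt x hx y hy
    rcases List.mem_flatMap.mp hx with ⟨r, _, hxr⟩
    rcases List.mem_flatMap.mp hy with ⟨r', _, hyr⟩
    rw [List.eq_of_mem_replicate hxr, List.eq_of_mem_replicate hyr]
    exact le_of_lt (pv_prep_lt hlt r r')

-- A's product, rendered as strings, unfolds level by level through pvPrep
theorem pvProdC_cons (s : List Char) (ss : List (List Char)) :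
    (pvProdC (s :: ss)).map String.ofList
      = s.flatMap (fun c => ((pvProdC ss).map String.ofList).map (pvPrep c)) := by
  simp only [pvProdC, List.map_flatMap, List.map_map]
  apply List.flatMap_congr
  intro c _
  apply List.map_congr_left
  intro l _
  simp [pvPrep, Function.comp, String.toList_ofList]

theorem pvChain_spec (ss : List (List Char)) :
    (pvChain ss).Perm ((pvProdC ss).map String.ofList) ∧ (pvChain ss).Pairwise (· ≤ ·) := by
  induction ss with
  | nil => exact ⟨by simp [pvChain, pvProdC], by simp [pvChain]⟩
  | cons s rest ih =>
    obtain ⟨hperm, hpw⟩ := ih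
    refine ⟨?_, pvStep_pairwise s _ hpw⟩
    rw [pvProdC_cons]
    exact pvStep_perm s _ _ hperm

-- the six character lists A and B draw from (out-of-range positions give the empty list)
def pvL (num : List String) : List (List Char) :=
  [(PySem.List.pyGetD num 0 "").toList, (PySem.List.pyGetD num 1 "").toList,
   (PySem.List.pyGetD num 2 "").toList, (PySem.List.pyGetD num 3 "").toList,
   (PySem.List.pyGetD num 4 "").toList, (PySem.List.pyGetD num 5 "").toList]

theorem pvProdC_of_mem_nil (ss : List (List Char)) (h : [] ∈ ss) : pvProdC ss = [] := by
  induction ss with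
  | nil => cases h
  | cons s rest ih =>
    rcases List.mem_cons.mp h with h | h
    · simp [pvProdC, ← h]
    · simp [pvProdC, ih h]

theorem comb_for_6key_A_red (num : List String) :
    comb_for_6key num
      = PySem.List.sorted ((pvProdC (pvL num)).map String.ofList) (fun x => x) false := by
  unfold comb_for_6key
  simp [pvL, pvProdC, List.map_flatMap]
  simp [List.flatMap_def]

theorem comb_for_6key_B_red (num : List String) (h : ¬ ("" ∈ PySem.List.slice num none (some 6))) :
    comb_for_6key_alt num = pvChain (pvL num) := by
  unfold comb_for_6key_alt
  rw [if_neg h]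
  rw [show PySem.List.pyRange 5 (-1) (-1) = [5, 4, 3, 2, 1, 0] from by decide]
  simp only [List.foldl_cons, List.foldl_nil,
    PySem.Dict.foldl_insert_getD_add_one_eq_counter, PySem.Dict.keys_counter,
    PySem.Dict.getD_counter, PySem.List.pyRange_zero_natCast]
  simp [pvL, pvChain, pvStep, pvPrep, Function.comp_def, List.map_const', List.length_range]

theorem pv_guard_nil (num : List String) (h : "" ∈ PySem.List.slice num none (some 6)) :
    [] ∈ pvL num := by
  rw [show PySem.List.slice num none (some 6) = num.take 6 from
    PySem.List.slice_to_natCast num 6] at h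
  rcases List.mem_take_iff_getElem.mp h with ⟨k, hk, hke⟩
  have hk6 : k < 6 := lt_of_lt_of_le hk (min_le_left _ _)
  have hkl : k < num.length := lt_of_lt_of_le hk (min_le_right _ _)
  have hg : (PySem.List.pyGetD num (k : Int) "").toList = [] := by
    rw [PySem.List.pyGetD_natCast]
    rw [List.getD_eq_getElem num "" hkl, hke]
    rfl
  interval_cases k <;> (simp only [pvL, List.mem_cons]; simp at hg ⊢; tauto)

-- ===== VERDICT (by name: the statement is the Claim_ definition above) =====
theorem comb_for_6key_spec : Claim_equal_comb_for_6key := by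
  intro num _ _
  unfold Spec_comb_for_6key
  by_cases h : "" ∈ PySem.List.slice num none (some 6)
  · have hB : comb_for_6key_alt num = [] := by unfold comb_for_6key_alt; rw [if_pos h]
    rw [hB, comb_for_6key_A_red, pvProdC_of_mem_nil _ (pv_guard_nil num h)]
    rfl
  · rw [comb_for_6key_A_red, comb_for_6key_B_red num h]
    obtain ⟨hperm, hpw⟩ := pvChain_spec (pvL num)
    exact PySem.List.sorted_id_eq_of_perm_of_pairwise _ _ hperm hpw
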